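-- pv_equiv track=rewrite | github.com/sayedabdulkarim/abdul-portfolio | backend/app/services/hybrid_chatbot.py | _validate_facts_streaming
-- ===== SOURCE A (Python) =====
-- def _validate_facts_streaming(chunk: str) -> str:
--     """Lightweight fact validation for streaming"""
--     # Quick validation for streaming - just check critical keywords
--     replacements = {
--         "Google": "Mira",  # If model hallucinates wrong company
--         "Microsoft": "Mira",
--         "CEO": "Senior Software Engineer",  # Correct role if needed
--     }
--
--     for wrong, correct in replacements.items():
--         if wrong in chunk:
--             chunk = chunk.replace(wrong, correct)
--
--     return chunk
-- ===== SOURCE B (Python) =====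
-- def _validate_facts_streaming(chunk: str) -> str:
--     """Lightweight fact validation for streaming"""
--     replacements = {
--         "Google": "Mira",
--         "Microsoft": "Mira",
--         "CEO": "Senior Software Engineer",
--     }
--     pieces = []
--     i = 0
--     n = len(chunk)
--     while i < n:
--         for wrong, correct in replacements.items():
--             if chunk.startswith(wrong, i):
--                 pieces.append(correct)
--                 i += len(wrong)
--                 break
--         else:
--             pieces.append(chunk[i])
--             i += 1
--     return "".join(pieces)
-- ===== Notes on version B (the rewrite author's own statement) =====
-- stated objective: alternative
-- what changed: B replaces A's three sequential full-string str.replace passes by one single left-to-right scan that tries each keyword at the current position and emits the replacement or the character, joining collected pieces at the end.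
import Mathlib
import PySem

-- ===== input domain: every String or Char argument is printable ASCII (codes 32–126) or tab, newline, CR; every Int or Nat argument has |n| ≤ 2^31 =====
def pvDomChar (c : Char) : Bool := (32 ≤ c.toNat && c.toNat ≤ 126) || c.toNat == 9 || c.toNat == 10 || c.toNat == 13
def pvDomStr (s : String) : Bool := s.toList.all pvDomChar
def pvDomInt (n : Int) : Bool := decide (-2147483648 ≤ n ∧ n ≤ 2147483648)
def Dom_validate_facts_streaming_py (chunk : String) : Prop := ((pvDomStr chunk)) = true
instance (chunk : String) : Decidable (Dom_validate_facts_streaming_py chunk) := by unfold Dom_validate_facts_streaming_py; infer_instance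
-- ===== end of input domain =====

-- B replaces A's three sequential str.replace passes by a single left-to-right scan
-- that tries each keyword at the current position (alternative, same cost).


-- ===== PORT A =====
-- A iterates over the literal 3-entry dict in insertion order; the loop is unrolled.
def validate_facts_streaming_py (chunk : String) : String :=
  let chunk1 := if PySem.Str.isIn "Google" chunk then PySem.Str.replace chunk "Google" "Mira" else chunk
  let chunk2 := if PySem.Str.isIn "Microsoft" chunk1 then PySem.Str.replace chunk1 "Microsoft" "Mira" else chunk1
  let chunk3 := if PySem.Str.isIn "CEO" chunk2 then PySem.Str.replace chunk2 "CEO" "Senior Software Engineer" else chunk2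
  chunk3

-- ===== PORT B =====
-- B is a single pass: at each position try the keywords in dict order; on a match
-- emit the replacement and skip the keyword, else copy the character.
def pvScanB : List Char → List Char
  | [] => []
  | c :: t =>
    if ("Google".toList).isPrefixOf (c :: t) then "Mira".toList ++ pvScanB (t.drop 5)
    else if ("Microsoft".toList).isPrefixOf (c :: t) then "Mira".toList ++ pvScanB (t.drop 8)
    else if ("CEO".toList).isPrefixOf (c :: t) then "Senior Software Engineer".toList ++ pvScanB (t.drop 2)
    else c :: pvScanB t
termination_by l => l.length
decreasing_by all_goals (simp [List.length_drop]; try omega)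

def validate_facts_streaming_py_alt (chunk : String) : String :=
  String.ofList (pvScanB chunk.toList)

-- ===== PRECONDITION & SPEC =====
def Spec_validate_facts_streaming_py (chunk : String) (out : String) : Prop := out = validate_facts_streaming_py_alt chunk
instance (chunk : String) (out : String) : Decidable (Spec_validate_facts_streaming_py chunk out) := by unfold Spec_validate_facts_streaming_py; infer_instance

-- ===== CLAIM (what is proved, stated in full; the proofs are below) =====
def Claim_equal_validate_facts_streaming_py : Prop := ∀ (chunk : String), Dom_validate_facts_streaming_py chunk → Spec_validate_facts_streaming_py chunk (validate_facts_streaming_py chunk)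

-- ===== LEMMAS AND PROOFS =====

-- A simple structural form of Python's str.replace on char lists (nonempty pattern).
def pvRepl (old new : List Char) : List Char → List Char
  | [] => []
  | c :: t =>
    if old.isPrefixOf (c :: t) then new ++ pvRepl old new ((c :: t).drop (max old.length 1))
    else c :: pvRepl old new t
termination_by l => l.length
decreasing_by all_goals (simp [List.length_drop]; try omega)

lemma pvRepl_nil (old new : List Char) : pvRepl old new [] = [] := by rw [pvRepl]

lemma pvRepl_pos {old : List Char} (new : List Char) {c : Char} {t : List Char}
    (h : old.isPrefixOf (c :: t)) :
    pvRepl old new (c :: t) = new ++ pvRepl old new ((c :: t).drop (max old.length 1)) := by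
  rw [pvRepl]; simp only [h, if_true]

lemma pvRepl_neg {old : List Char} (new : List Char) {c : Char} {t : List Char}
    (h : ¬ old.isPrefixOf (c :: t)) :
    pvRepl old new (c :: t) = c :: pvRepl old new t := by
  rw [pvRepl]; simp only [h, Bool.false_eq_true, reduceIte]

-- PySem's replace equals pvRepl for a nonempty pattern.
lemma replace_go_eq (old new : List Char) (hold : old ≠ []) :
    ∀ fuel l acc, l.length ≤ fuel →
      PySem.Chars.replace.go old new fuel l acc = acc.reverse ++ pvRepl old new l := by
  intro fuel
  induction fuel with
  | zero =>
    intro l acc hl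
    have : l = [] := List.eq_nil_of_length_eq_zero (Nat.le_zero.mp hl)
    subst this
    rw [PySem.Chars.replace.go.eq_def]; simp [pvRepl_nil]
  | succ n ih =>
    intro l acc hl
    cases l with
    | nil => rw [PySem.Chars.replace.go.eq_def]; simp [pvRepl_nil]
    | cons c t =>
      rw [PySem.Chars.replace.go.eq_def]
      by_cases h : old.isPrefixOf (c :: t)
      · simp only [h, if_true]
        have hlen : old.length ≥ 1 := by
          cases old with
          | nil => exact absurd rfl hold
          | cons _ _ => simp
        have hdlen : (List.drop old.length (c :: t)).length ≤ n := by
          simp only [List.length_drop, List.length_cons] at hl ⊢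
          omega
        rw [ih _ _ hdlen, pvRepl_pos new h]
        have : max old.length 1 = old.length := by omega
        rw [this]
        simp
      · simp only [h, Bool.false_eq_true, reduceIte]
        have : t.length ≤ n := by simp only [List.length_cons] at hl; omega
        rw [ih _ _ this, pvRepl_neg new h]
        simp

lemma replace_eq_pvRepl (s old new : List Char) (hold : old ≠ []) :
    PySem.Chars.replace s old new = pvRepl old new s := by
  rw [PySem.Chars.replace]
  have : old.isEmpty = false := by cases old <;> simp_all
  rw [this]
  simpa using replace_go_eq old new hold s.length s [] (le_refl _)

-- replace is the identity when the pattern does not occur.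
lemma pvRepl_id (old new : List Char) : ∀ n l, l.length ≤ n → ¬ old <:+: l → pvRepl old new l = l := by
  intro n
  induction n with
  | zero =>
    intro l hl _
    have : l = [] := List.eq_nil_of_length_eq_zero (Nat.le_zero.mp hl)
    subst this; exact pvRepl_nil _ _
  | succ n ih =>
    intro l hl hinf
    cases l with
    | nil => exact pvRepl_nil _ _
    | cons c t =>
      have hpre : ¬ old.isPrefixOf (c :: t) := by
        intro h
        exact hinf (List.IsPrefix.isInfix (List.isPrefixOf_iff_prefix.mp h))
      rw [pvRepl_neg new hpre]
      have ht : ¬ old <:+: t := fun h => hinf (h.trans (List.suffix_cons c t).isInfix)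
      have : t.length ≤ n := by simp only [List.length_cons] at hl; omega
      rw [ih t this ht]

-- A pattern that avoids new's first character and prefixes the scan output
-- already prefixed the input (replacement regions start with new's head).
lemma pvRepl_reflect (old new : List Char) (b : Char) (hb : new.head? = some b) :
    ∀ n l q, b ∉ q → l.length ≤ n →
      q <+: pvRepl old new l → q <+: l := by
  intro n
  induction n with
  | zero =>
    intro l q _ hl hp
    have : l = [] := List.eq_nil_of_length_eq_zero (Nat.le_zero.mp hl)
    subst this; simpa [pvRepl_nil] using hp
  | succ n ih =>
    intro l q hq hl hp
    cases l with
    | nil => simpa [pvRepl_nil] using hp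
    | cons c t =>
      by_cases h : old.isPrefixOf (c :: t)
      · rw [pvRepl_pos new h] at hp
        cases q with
        | nil => exact List.nil_prefix
        | cons a q' =>
          exfalso
          cases new with
          | nil => simp at hb
          | cons b' nt =>
            have hb' : b' = b := by simpa using hb
            rw [List.cons_append, List.cons_prefix_cons] at hp
            exact hq (List.mem_cons.mpr (Or.inl (hp.1.trans hb').symm))
      · rw [pvRepl_neg new h] at hp
        cases q with
        | nil => exact List.nil_prefix
        | cons a q' =>
          rw [List.cons_prefix_cons] at hp ⊢
          have ht : t.length ≤ n := by simp only [List.length_cons] at hl; omega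
          exact ⟨hp.1, ih t q' (fun hm => hq (List.mem_cons_of_mem a hm)) ht hp.2⟩

-- Transparency of concrete blocks: a scan passes over them unchanged.
lemma mira_transparent_ms (X : List Char) :
    pvRepl "Microsoft".toList "Mira".toList ("Mira".toList ++ X)
      = "Mira".toList ++ pvRepl "Microsoft".toList "Mira".toList X := by
  show pvRepl _ _ ('M'::'i'::'r'::'a'::X) = 'M'::'i'::'r'::'a':: pvRepl _ _ X
  rw [pvRepl_neg _ (by simp [List.isPrefixOf]), pvRepl_neg _ (by simp [List.isPrefixOf]),
      pvRepl_neg _ (by simp [List.isPrefixOf]), pvRepl_neg _ (by simp [List.isPrefixOf])]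

lemma mira_transparent_c (X : List Char) :
    pvRepl "CEO".toList "Senior Software Engineer".toList ("Mira".toList ++ X)
      = "Mira".toList ++ pvRepl "CEO".toList "Senior Software Engineer".toList X := by
  show pvRepl _ _ ('M'::'i'::'r'::'a'::X) = 'M'::'i'::'r'::'a':: pvRepl _ _ X
  rw [pvRepl_neg _ (by simp [List.isPrefixOf]), pvRepl_neg _ (by simp [List.isPrefixOf]),
      pvRepl_neg _ (by simp [List.isPrefixOf]), pvRepl_neg _ (by simp [List.isPrefixOf])]

lemma ms_transparent_g (X : List Char) :
    pvRepl "Google".toList "Mira".toList ("Microsoft".toList ++ X)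
      = "Microsoft".toList ++ pvRepl "Google".toList "Mira".toList X := by
  show pvRepl _ _ ('M'::'i'::'c'::'r'::'o'::'s'::'o'::'f'::'t'::X)
      = 'M'::'i'::'c'::'r'::'o'::'s'::'o'::'f'::'t':: pvRepl _ _ X
  rw [pvRepl_neg _ (by simp [List.isPrefixOf]), pvRepl_neg _ (by simp [List.isPrefixOf]),
      pvRepl_neg _ (by simp [List.isPrefixOf]), pvRepl_neg _ (by simp [List.isPrefixOf]),
      pvRepl_neg _ (by simp [List.isPrefixOf]), pvRepl_neg _ (by simp [List.isPrefixOf]),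
      pvRepl_neg _ (by simp [List.isPrefixOf]), pvRepl_neg _ (by simp [List.isPrefixOf]),
      pvRepl_neg _ (by simp [List.isPrefixOf])]

lemma ceo_transparent_g (X : List Char) :
    pvRepl "Google".toList "Mira".toList ("CEO".toList ++ X)
      = "CEO".toList ++ pvRepl "Google".toList "Mira".toList X := by
  show pvRepl _ _ ('C'::'E'::'O'::X) = 'C'::'E'::'O':: pvRepl _ _ X
  rw [pvRepl_neg _ (by simp [List.isPrefixOf]), pvRepl_neg _ (by simp [List.isPrefixOf]),
      pvRepl_neg _ (by simp [List.isPrefixOf])]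

lemma ceo_transparent_ms (X : List Char) :
    pvRepl "Microsoft".toList "Mira".toList ("CEO".toList ++ X)
      = "CEO".toList ++ pvRepl "Microsoft".toList "Mira".toList X := by
  show pvRepl _ _ ('C'::'E'::'O'::X) = 'C'::'E'::'O':: pvRepl _ _ X
  rw [pvRepl_neg _ (by simp [List.isPrefixOf]), pvRepl_neg _ (by simp [List.isPrefixOf]),
      pvRepl_neg _ (by simp [List.isPrefixOf])]

-- Self-match of a scan on its own keyword at the front.
lemma ms_self (X : List Char) :
    pvRepl "Microsoft".toList "Mira".toList ("Microsoft".toList ++ X)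
      = "Mira".toList ++ pvRepl "Microsoft".toList "Mira".toList X := by
  show pvRepl _ _ ('M'::'i'::'c'::'r'::'o'::'s'::'o'::'f'::'t'::X) = _
  rw [pvRepl_pos _ (by simp [List.isPrefixOf])]
  simp

lemma ceo_self (X : List Char) :
    pvRepl "CEO".toList "Senior Software Engineer".toList ("CEO".toList ++ X)
      = "Senior Software Engineer".toList ++ pvRepl "CEO".toList "Senior Software Engineer".toList X := by
  show pvRepl _ _ ('C'::'E'::'O'::X) = _
  rw [pvRepl_pos _ (by simp [List.isPrefixOf])]
  simp

-- Equation lemmas for the B scanner.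
lemma scanB_pos1 {c : Char} {t : List Char} (h : ("Google".toList).isPrefixOf (c :: t)) :
    pvScanB (c :: t) = "Mira".toList ++ pvScanB (t.drop 5) := by
  rw [pvScanB]; simp only [h, if_true]

lemma scanB_pos2 {c : Char} {t : List Char} (h1 : ¬ ("Google".toList).isPrefixOf (c :: t))
    (h2 : ("Microsoft".toList).isPrefixOf (c :: t)) :
    pvScanB (c :: t) = "Mira".toList ++ pvScanB (t.drop 8) := by
  rw [pvScanB]; simp only [h1, h2, if_true, Bool.false_eq_true, reduceIte]

lemma scanB_pos3 {c : Char} {t : List Char} (h1 : ¬ ("Google".toList).isPrefixOf (c :: t))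
    (h2 : ¬ ("Microsoft".toList).isPrefixOf (c :: t)) (h3 : ("CEO".toList).isPrefixOf (c :: t)) :
    pvScanB (c :: t) = "Senior Software Engineer".toList ++ pvScanB (t.drop 2) := by
  rw [pvScanB]; simp only [h1, h2, h3, if_true, Bool.false_eq_true, reduceIte]

lemma scanB_neg {c : Char} {t : List Char} (h1 : ¬ ("Google".toList).isPrefixOf (c :: t))
    (h2 : ¬ ("Microsoft".toList).isPrefixOf (c :: t)) (h3 : ¬ ("CEO".toList).isPrefixOf (c :: t)) :
    pvScanB (c :: t) = c :: pvScanB t := by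
  rw [pvScanB]; simp only [h1, h2, h3, Bool.false_eq_true, reduceIte]

-- The main equivalence: three sequential scans equal the simultaneous scan.
lemma main_scan : ∀ n l, l.length ≤ n →
    pvRepl "CEO".toList "Senior Software Engineer".toList
      (pvRepl "Microsoft".toList "Mira".toList
        (pvRepl "Google".toList "Mira".toList l)) = pvScanB l := by
  intro n
  induction n with
  | zero =>
    intro l hl
    have : l = [] := List.eq_nil_of_length_eq_zero (Nat.le_zero.mp hl)
    subst this; simp [pvRepl_nil, pvScanB]
  | succ n ih =>
    intro l hl
    cases l with
    | nil => simp [pvRepl_nil, pvScanB]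
    | cons c t =>
      by_cases hG : ("Google".toList).isPrefixOf (c :: t)
      · obtain ⟨r, hr⟩ := List.isPrefixOf_iff_prefix.mp hG
        have hlen := congrArg List.length hr
        simp only [List.length_append, List.length_cons] at hlen hl
        have hdrop : List.drop 6 (c :: t) = r := by rw [← hr]; simp
        have hdrop5 : t.drop 5 = r := by simpa using hdrop
        rw [pvRepl_pos _ hG]
        have hmax : max ("Google".toList).length 1 = 6 := by decide
        rw [hmax, hdrop, mira_transparent_ms, mira_transparent_c]
        rw [ih r (by omega), scanB_pos1 hG, hdrop5]
      · by_cases hMs : ("Microsoft".toList).isPrefixOf (c :: t)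
        · obtain ⟨r, hr⟩ := List.isPrefixOf_iff_prefix.mp hMs
          have hlen := congrArg List.length hr
          simp only [List.length_append, List.length_cons] at hlen hl
          have hdrop8 : t.drop 8 = r := by
            have : List.drop 9 (c :: t) = r := by rw [← hr]; simp
            simpa using this
          have h9 : ("Microsoft".toList).length = 9 := by decide
          rw [← hr, ms_transparent_g, ms_self, mira_transparent_c]
          rw [ih r (by omega), hr, scanB_pos2 hG hMs, hdrop8]
        · by_cases hC : ("CEO".toList).isPrefixOf (c :: t)
          · obtain ⟨r, hr⟩ := List.isPrefixOf_iff_prefix.mp hC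
            have hlen := congrArg List.length hr
            simp only [List.length_append, List.length_cons] at hlen hl
            have hdrop2 : t.drop 2 = r := by
              have : List.drop 3 (c :: t) = r := by rw [← hr]; simp
              simpa using this
            have h3 : ("CEO".toList).length = 3 := by decide
            rw [← hr, ceo_transparent_g, ceo_transparent_ms, ceo_self]
            rw [ih r (by omega), hr, scanB_pos3 hG hMs hC, hdrop2]
          · have ht : t.length ≤ n := by simp only [List.length_cons] at hl; omega
            rw [pvRepl_neg _ hG]
            have hMs' : ¬ ("Microsoft".toList).isPrefixOf
                ((c : Char) :: pvRepl "Google".toList "Mira".toList t) := by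
              intro h
              have hpre := List.isPrefixOf_iff_prefix.mp h
              rw [show ("Microsoft".toList) = 'M' :: "icrosoft".toList from rfl,
                  List.cons_prefix_cons] at hpre
              obtain ⟨hc, hq⟩ := hpre
              have hq' : ("icrosoft".toList) <+: t :=
                pvRepl_reflect _ _ 'M' (by decide) t.length t _ (by decide) (le_refl _) hq
              apply hMs
              rw [List.isPrefixOf_iff_prefix,
                  show ("Microsoft".toList) = 'M' :: "icrosoft".toList from rfl,
                  List.cons_prefix_cons]
              exact ⟨hc, hq'⟩
            rw [pvRepl_neg _ hMs']
            have hC' : ¬ ("CEO".toList).isPrefixOf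
                ((c : Char) :: pvRepl "Microsoft".toList "Mira".toList
                  (pvRepl "Google".toList "Mira".toList t)) := by
              intro h
              have hpre := List.isPrefixOf_iff_prefix.mp h
              rw [show ("CEO".toList) = 'C' :: "EO".toList from rfl,
                  List.cons_prefix_cons] at hpre
              obtain ⟨hc, hq⟩ := hpre
              have hq1 : ("EO".toList) <+: pvRepl "Google".toList "Mira".toList t :=
                pvRepl_reflect _ _ 'M' (by decide)
                  (pvRepl "Google".toList "Mira".toList t).length _ _ (by decide) (le_refl _) hq
              have hq2 : ("EO".toList) <+: t :=
                pvRepl_reflect _ _ 'M' (by decide) t.length t _ (by decide) (le_refl _) hq1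
              apply hC
              rw [List.isPrefixOf_iff_prefix,
                  show ("CEO".toList) = 'C' :: "EO".toList from rfl,
                  List.cons_prefix_cons]
              exact ⟨hc, hq2⟩
            rw [pvRepl_neg _ hC']
            rw [ih t ht, scanB_neg hG hMs hC]

-- Each guarded pass of A equals the unguarded scan pvRepl.
lemma guarded_pass (s : String) (old new : String) (hold : old.toList ≠ []) :
    (if PySem.Str.isIn old s then PySem.Str.replace s old new else s).toList
      = pvRepl old.toList new.toList s.toList := by
  by_cases h : PySem.Str.isIn old s
  · simp only [h, if_true, PySem.Str.toList_replace]
    exact replace_eq_pvRepl _ _ _ hold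
  · simp only [h, Bool.false_eq_true, reduceIte]
    have hinf : ¬ old.toList <:+: s.toList := by
      intro hi
      exact h ((PySem.Str.isIn_iff_infix old s).mpr hi)
    rw [pvRepl_id _ _ s.toList.length s.toList (le_refl _) hinf]

-- ===== VERDICT (by name: the statement is the Claim_ definition above) =====
theorem validate_facts_streaming_py_spec : Claim_equal_validate_facts_streaming_py := by
  intro chunk _
  unfold Spec_validate_facts_streaming_py validate_facts_streaming_py validate_facts_streaming_py_alt
  apply String.toList_inj.mp
  rw [guarded_pass _ _ _ (by decide), guarded_pass _ _ _ (by decide),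
      guarded_pass _ _ _ (by decide)]
  simpa using main_scan chunk.toList.length chunk.toList (le_refl _)
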